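-- pv_equiv track=rewrite | github.com/tworjaga/keyspace | backend/brute_force_thread.py | generate_mask_passwords
-- ===== SOURCE A (Python) =====
-- import string
--
-- def generate_mask_passwords(mask: str, limit: int = 100000) -> str:
--     """Generate passwords from mask pattern using Hashcat-style notation.
--
--     Supports mask characters:
--     - ?a: Any character (letters, digits, symbols)
--     - ?u: Uppercase letters
--     - ?l: Lowercase letters
--     - ?d: Digits
--     - ?s: Special characters
--     - ?h: Hexadecimal digits
--     - ?H: Uppercase hexadecimal digits
--     - ?b: Binary digits (0, 1)
--
--     Args:
--         mask: Mask pattern string (e.g., "?u?l?l?l?d?d?d?d")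
--         limit: Maximum number of passwords to generate
--
--     Yields:
--         Generated password strings matching the mask pattern
--     """
--     charset_map = {
--         '?a': string.ascii_letters + string.digits + string.punctuation,
--         '?u': string.ascii_uppercase,
--         '?l': string.ascii_lowercase,
--         '?d': string.digits,
--         '?s': string.punctuation,
--         '?h': string.hexdigits,
--         '?H': string.hexdigits.upper(),
--         '?b': '01'
--     }
--
--     # Parse mask
--     current_charset = charset_map['?a']
--     password = []
--
--     i = 0
--     while i < len(mask) and len(password) < limit:
--         if mask[i] == '?':
--             if i + 1 < len(mask):
--                 char_set = charset_map.get(mask[i:i+2], charset_map['?a'])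
--                 password.append(char_set[0])
--                 i += 2
--             else:
--                 password.append(current_charset[0])
--                 i += 1
--         else:
--             password.append(mask[i])
--             i += 1
--
--         yield ''.join(password)
-- ===== SOURCE B (Python) =====
-- import string
--
-- # first character of each hashcat charset (charset_map[code][0] in A)
-- _FIRST = {'?a': 'a', '?u': 'A', '?l': 'a', '?d': '0', '?s': '!',
--           '?h': '0', '?H': '0', '?b': '0'}
--
--
-- def generate_mask_passwords(mask: str, limit: int = 100000):
--     # pass 1: parse the mask into the list of single characters appended per step
--     tokens = []
--     i = 0
--     n = len(mask)
--     while i < n: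
--         if mask[i] == '?' and i + 1 < n:
--             tokens.append(_FIRST.get(mask[i:i + 2], 'a'))
--             i += 2
--         elif mask[i] == '?':
--             tokens.append('a')
--             i += 1
--         else:
--             tokens.append(mask[i])
--             i += 1
--     # pass 2: accumulate the growing prefix over the first max(limit, 0) tokens
--     prefix = ''
--     for t in tokens[:max(limit, 0)]:
--         prefix += t
--         yield prefix
-- ===== Notes on version B (the rewrite author's own statement) =====
-- stated objective: simpler
-- what changed: A interleaves parsing and yielding in one index loop that re-joins the whole password list on every step; B first parses the mask once into a list of per-step characters (using a precomputed first-character map instead of full charset strings) and then emits the growing prefix by string accumulation over the first max(limit,0) tokens.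
import Mathlib
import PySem

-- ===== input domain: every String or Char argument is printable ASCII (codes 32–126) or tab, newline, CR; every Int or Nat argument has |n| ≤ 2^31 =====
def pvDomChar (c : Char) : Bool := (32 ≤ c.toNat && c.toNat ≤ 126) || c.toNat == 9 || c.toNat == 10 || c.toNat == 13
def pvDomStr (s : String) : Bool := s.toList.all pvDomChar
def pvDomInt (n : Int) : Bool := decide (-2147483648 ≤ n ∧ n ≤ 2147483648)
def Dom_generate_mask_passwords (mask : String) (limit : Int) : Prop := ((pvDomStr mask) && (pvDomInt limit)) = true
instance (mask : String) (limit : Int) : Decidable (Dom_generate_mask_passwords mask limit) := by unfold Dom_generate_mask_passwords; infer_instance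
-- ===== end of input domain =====

-- B separates mask parsing (one pass building the per-step token list) from prefix
-- accumulation over the first max(limit,0) tokens; same outputs, plainer decomposition.


-- ===== PORT A =====
-- charset_map of A, literally (values are the full charset strings)
def pvCharsetMap : PySem.Dict String String := PySem.Dict.ofList
  [ ("?a", "abcdefghijklmnopqrstuvwxyzABCDEFGHIJKLMNOPQRSTUVWXYZ0123456789!\"#$%&'()*+,-./:;<=>?@[\\]^_`{|}~")
  , ("?u", "ABCDEFGHIJKLMNOPQRSTUVWXYZ")
  , ("?l", "abcdefghijklmnopqrstuvwxyz")
  , ("?d", "0123456789")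
  , ("?s", "!\"#$%&'()*+,-./:;<=>?@[\\]^_`{|}~")
  , ("?h", "0123456789abcdefABCDEF")
  , ("?H", "0123456789ABCDEFABCDEF")
  , ("?b", "01") ]

-- current_charset = charset_map['?a']
def pvCsA : String := "abcdefghijklmnopqrstuvwxyzABCDEFGHIJKLMNOPQRSTUVWXYZ0123456789!\"#$%&'()*+,-./:;<=>?@[\\]^_`{|}~"

-- char_set[0]: all charsets in the map (and the default) are nonempty literals, so
-- Python's s[0] never raises; '.getD' of pyGet? is exact here.
def pvFirstChar (s : String) : Char := (PySem.Str.pyGet? s 0).getD 'a'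

-- the while loop of A: rest = mask[i:], password = chars appended so far, acc = yielded strings
def pvGenALoop (limit : Int) (rest : List Char) (password : List Char) (acc : List String) : List String :=
  match rest with
  | [] => acc
  | c :: rest' =>
    if (password.length : Int) < limit then
      if c = '?' then
        match rest' with
        | c2 :: rest'' =>
          -- mask[i:i+2] with i+1 < len(mask) is the two characters c, c2
          let cs := pvCharsetMap.getD (String.ofList [c, c2]) pvCsA
          let p := password ++ [pvFirstChar cs]
          pvGenALoop limit rest'' p (acc ++ [String.ofList p])
        | [] =>
          let p := password ++ [pvFirstChar pvCsA]
          pvGenALoop limit [] p (acc ++ [String.ofList p])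
      else
        let p := password ++ [c]
        pvGenALoop limit rest' p (acc ++ [String.ofList p])
    else acc
termination_by rest.length
decreasing_by all_goals (simp only [List.length_cons]; omega)

def generate_mask_passwords (mask : String) (limit : Int) : List String :=
  pvGenALoop limit mask.toList [] []

-- ===== PORT B =====
-- _FIRST of Source B
def pvFirstMap : PySem.Dict String Char := PySem.Dict.ofList
  [ ("?a", 'a'), ("?u", 'A'), ("?l", 'a'), ("?d", '0'), ("?s", '!')
  , ("?h", '0'), ("?H", '0'), ("?b", '0') ]

-- pass 1 of Source B: the per-step token list
def pvTokens : List Char → List Char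
  | [] => []
  | c :: rest =>
    if c = '?' then
      match rest with
      | c2 :: rest' => pvFirstMap.getD (String.ofList [c, c2]) 'a' :: pvTokens rest'
      | [] => ['a']
    else c :: pvTokens rest

-- pass 2 of Source B: growing prefix over the token list
def pvAccum (pref : List Char) : List Char → List String
  | [] => []
  | t :: ts => String.ofList (pref ++ [t]) :: pvAccum (pref ++ [t]) ts

def generate_mask_passwords_alt (mask : String) (limit : Int) : List String :=
  -- tokens[:max(limit, 0)] with a nonnegative bound is List.take
  pvAccum [] ((pvTokens mask.toList).take (max limit 0).toNat)

-- ===== PRECONDITION & SPEC =====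
def Spec_generate_mask_passwords (mask : String) (limit : Int) (out : List String) : Prop := out = generate_mask_passwords_alt mask limit
instance (mask : String) (limit : Int) (out : List String) : Decidable (Spec_generate_mask_passwords mask limit out) := by unfold Spec_generate_mask_passwords; infer_instance

-- ===== CLAIM (what is proved, stated in full; the proofs are below) =====
def Claim_equal_generate_mask_passwords : Prop := ∀ (mask : String) (limit : Int), Dom_generate_mask_passwords mask limit → Spec_generate_mask_passwords mask limit (generate_mask_passwords mask limit)

-- ===== LEMMAS AND PROOFS =====

-- the first char of the looked-up charset is the looked-up first char
lemma pvToken_bridge (c2 : Char) :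
    pvFirstChar (pvCharsetMap.getD (String.ofList ['?', c2]) pvCsA)
      = pvFirstMap.getD (String.ofList ['?', c2]) 'a' := by
  have ea : ("?a" : String) = String.ofList ['?','a'] := rfl
  have eu : ("?u" : String) = String.ofList ['?','u'] := rfl
  have el : ("?l" : String) = String.ofList ['?','l'] := rfl
  have ed : ("?d" : String) = String.ofList ['?','d'] := rfl
  have es : ("?s" : String) = String.ofList ['?','s'] := rfl
  have eh : ("?h" : String) = String.ofList ['?','h'] := rfl
  have eH : ("?H" : String) = String.ofList ['?','H'] := rfl
  have eb : ("?b" : String) = String.ofList ['?','b'] := rfl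
  simp only [pvCharsetMap, pvFirstMap, PySem.Dict.ofList, PySem.Dict.update, List.foldl,
    PySem.Dict.getD_insert, PySem.Dict.getD_empty, ea, eu, el, ed, es, eh, eH, eb,
    String.ofList_inj, List.cons.injEq, true_and, and_true]
  split_ifs <;> decide

lemma pvLoop_eq (rest : List Char) (limit : Int) (password : List Char) (acc : List String) :
    pvGenALoop limit rest password acc
      = acc ++ pvAccum password ((pvTokens rest).take (limit - password.length).toNat) := by
  fun_induction pvGenALoop limit rest password acc
  case case1 => simp [pvTokens, pvAccum]
  case case2 pw ac hl c2 rest2 cs p ih =>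
    have ht : pvTokens ('?' :: c2 :: rest2)
        = pvFirstMap.getD (String.ofList ['?', c2]) 'a' :: pvTokens rest2 := by
      simp [pvTokens]
    have hk : (limit - (pw.length : Int)).toNat
        = (limit - ((pw.length : Int) + 1)).toNat + 1 := by omega
    have hn : (limit - ((pw.length : Int) + 1)).toNat = limit.toNat - (pw.length + 1) := by omega
    rw [ht, hk, List.take_succ_cons, ih]
    simp [pvAccum, p, cs, pvToken_bridge, List.append_assoc, hn]
  case case3 pw ac hl p ih =>
    have ht : pvTokens ['?'] = ['a'] := by simp [pvTokens]
    have hk : (limit - (pw.length : Int)).toNat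
        = (limit - ((pw.length : Int) + 1)).toNat + 1 := by omega
    have hfa : pvFirstChar pvCsA = 'a' := by decide
    have hn : (limit - ((pw.length : Int) + 1)).toNat = limit.toNat - (pw.length + 1) := by omega
    rw [ht, hk, List.take_succ_cons, ih]
    simp [pvAccum, p, pvTokens, hfa, hn]
  case case4 pw ac c rest2 hl hq p ih =>
    have ht : pvTokens (c :: rest2) = c :: pvTokens rest2 := by
      rw [pvTokens.eq_def]; simp [hq]
    have hk : (limit - (pw.length : Int)).toNat
        = (limit - ((pw.length : Int) + 1)).toNat + 1 := by omega
    have hn : (limit - ((pw.length : Int) + 1)).toNat = limit.toNat - (pw.length + 1) := by omega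
    rw [ht, hk, List.take_succ_cons, ih]
    simp [pvAccum, p, List.append_assoc, hn]
  case case5 pw ac c rest2 hl =>
    have hk : (limit - (pw.length : Int)).toNat = 0 := by omega
    rw [hk]
    simp [pvAccum]

theorem pv_main (mask : String) (limit : Int) :
    generate_mask_passwords mask limit = generate_mask_passwords_alt mask limit := by
  unfold generate_mask_passwords generate_mask_passwords_alt
  rw [pvLoop_eq]
  have h : limit.toNat = (max limit 0).toNat := by omega
  simp [h]

-- ===== VERDICT (by name: the statement is the Claim_ definition above) =====
theorem generate_mask_passwords_spec : Claim_equal_generate_mask_passwords := by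
  intro mask limit _
  exact pv_main mask limit
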